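-- pv_equiv track=rewrite | github.com/p2k/gw2-discord-webhooks | gw2_discord_webhooks/matches.py | format_world_name
-- ===== SOURCE A (Python) =====
-- def format_world_name(world, main_world, linked_worlds, world_names):
--     """
--     Returns a formatted text fragment representing the given world plus its linked worlds.
--
--     If any of the worlds is the main world, it will be underlined.
--     """
--
--     ft = [
--         ("underline" if main_world == world else "", world_names[main_world]),
--     ]
--
--     first_lw = True
--     for lw in linked_worlds:
--         if first_lw:
--             ft.append(("", " (+ "))
--             first_lw = False
--         else:
--             ft.append(("", ", "))
--         ft.append(("underline" if lw == world else "", world_names[lw]))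
--
--     if not first_lw:
--         ft.append(("", ")"))
--
--     return ft
-- ===== SOURCE B (Python) =====
-- def format_world_name(world, main_world, linked_worlds, world_names):
--     def tup(w):
--         return ("underline" if w == world else "", world_names[w])
--     # build the linked-worlds suffix back-to-front, with a ", " separator before each
--     tail = []
--     for lw in reversed(linked_worlds):
--         tail = [("", ", "), tup(lw)] + tail
--     if tail:
--         tail[0] = ("", " (+ ")   # the first separator is the opening instead
--         tail.append(("", ")"))
--     return [tup(main_world)] + tail
-- ===== Notes on version B (the rewrite author's own statement) =====
-- stated objective: alternative
-- what changed: Instead of A's forward loop threading a first_lw flag and a trailing flag check, B builds the linked-worlds suffix back-to-front by prepending a ', ' separator plus name tuple for each element of reversed(linked_worlds), then rewrites the head separator to ' (+ ' and appends ')'.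
import Mathlib
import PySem

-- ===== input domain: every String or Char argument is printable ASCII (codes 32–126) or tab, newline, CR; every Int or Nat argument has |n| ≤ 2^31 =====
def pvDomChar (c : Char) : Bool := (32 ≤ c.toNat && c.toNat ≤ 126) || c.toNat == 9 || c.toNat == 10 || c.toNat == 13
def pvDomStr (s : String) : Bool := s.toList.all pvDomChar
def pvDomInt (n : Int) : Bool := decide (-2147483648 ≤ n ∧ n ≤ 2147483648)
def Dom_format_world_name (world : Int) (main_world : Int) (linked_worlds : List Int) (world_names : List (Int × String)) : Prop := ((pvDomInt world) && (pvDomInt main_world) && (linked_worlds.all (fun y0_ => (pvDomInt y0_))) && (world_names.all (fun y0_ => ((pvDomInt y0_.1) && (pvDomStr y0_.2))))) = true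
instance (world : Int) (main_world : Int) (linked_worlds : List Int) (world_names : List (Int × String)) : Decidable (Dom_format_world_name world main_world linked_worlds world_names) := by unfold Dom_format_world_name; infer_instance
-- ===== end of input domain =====

-- B builds the linked-worlds suffix BACK-TO-FRONT (prepending a ", " separator + name tuple per
-- element of the reversed list), then rewrites the head separator to " (+ " and closes with ")";
-- A builds forward with a first_lw flag. Same return value, same linear number of tuples.

-- dict lookup world_names[k] (Pre_ guarantees the key is present; outside Pre_ Python raises KeyError)
def pvName (world_names : List (Int × String)) (k : Int) : String :=
  ((PySem.Dict.mk world_names).get? k).getD ""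

-- ===== PORT A =====
def format_world_name (world : Int) (main_world : Int) (linked_worlds : List Int) (world_names : List (Int × String)) : List (String × String) :=
  let ft : List (String × String) :=
    [((if main_world == world then "underline" else ""), pvName world_names main_world)]
  let st := linked_worlds.foldl
    (fun (p : List (String × String) × Bool) lw =>
      (p.1 ++ (if p.2 then [("", " (+ ")] else [("", ", ")]) ++
        [((if lw == world then "underline" else ""), pvName world_names lw)], false))
    (ft, true)
  if st.2 then st.1 else st.1 ++ [("", ")")]

-- ===== PORT B =====
def format_world_name_alt (world : Int) (main_world : Int) (linked_worlds : List Int) (world_names : List (Int × String)) : List (String × String) :=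
  let tail := linked_worlds.reverse.foldl
    (fun (out : List (String × String)) lw =>
      [("", ", "), ((if lw == world then "underline" else ""), pvName world_names lw)] ++ out) []
  match tail with
  | [] => [((if main_world == world then "underline" else ""), pvName world_names main_world)]
  | _ :: t =>
    [((if main_world == world then "underline" else ""), pvName world_names main_world)] ++
      (("", " (+ ") :: t) ++ [("", ")")]

-- ===== PRECONDITION & SPEC =====
-- Pre_ excludes exactly the inputs where Python A raises KeyError: a looked-up world id missing from world_names.
def Pre_format_world_name (world : Int) (main_world : Int) (linked_worlds : List Int) (world_names : List (Int × String)) : Prop :=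
  main_world ∈ world_names.map Prod.fst ∧ ∀ lw ∈ linked_worlds, lw ∈ world_names.map Prod.fst
instance (world : Int) (main_world : Int) (linked_worlds : List Int) (world_names : List (Int × String)) : Decidable (Pre_format_world_name world main_world linked_worlds world_names) := by unfold Pre_format_world_name; infer_instance

def pvWitness_format_world_name : Int × Int × List Int × (List (Int × String)) :=
  (1, 1, [2, 3], [(1, "Anvil"), (2, "Blackgate"), (3, "Crystal")])

def Spec_format_world_name (world : Int) (main_world : Int) (linked_worlds : List Int) (world_names : List (Int × String)) (out : List (String × String)) : Prop := out = format_world_name_alt world main_world linked_worlds world_names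
instance (world : Int) (main_world : Int) (linked_worlds : List Int) (world_names : List (Int × String)) (out : List (String × String)) : Decidable (Spec_format_world_name world main_world linked_worlds world_names out) := by unfold Spec_format_world_name; infer_instance

-- ===== CLAIM (what is proved, stated in full; the proofs are below) =====
def Claim_equal_format_world_name : Prop := ∀ (world : Int) (main_world : Int) (linked_worlds : List Int) (world_names : List (Int × String)), Dom_format_world_name world main_world linked_worlds world_names → Pre_format_world_name world main_world linked_worlds world_names → Spec_format_world_name world main_world linked_worlds world_names (format_world_name world main_world linked_worlds world_names)

-- ===== LEMMAS AND PROOFS =====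

-- A's loop after the first iteration (flag already false) appends ", " plus a name per element.
theorem pv_foldA (world : Int) (world_names : List (Int × String)) (rest : List Int) (acc : List (String × String)) :
    rest.foldl
      (fun (p : List (String × String) × Bool) lw =>
        (p.1 ++ (if p.2 then [("", " (+ ")] else [("", ", ")]) ++
          [((if lw == world then "underline" else ""), pvName world_names lw)], false))
      (acc, false)
    = (acc ++ rest.flatMap
        (fun lw => [("", ", "), ((if lw == world then "underline" else ""), pvName world_names lw)]), false) := by
  induction rest generalizing acc with
  | nil => simp
  | cons lw rest ih =>
    simp only [List.foldl_cons, if_neg (by simp : ¬ (false = true)), ih, List.flatMap_cons]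
    simp [List.append_assoc]

-- B's backwards fold prepends f lw per element of the reversed list, i.e. produces the flatMap.
theorem pv_foldB {α β : Type} (f : α → List β) (l : List α) (init : List β) :
    l.reverse.foldl (fun out x => f x ++ out) init = l.flatMap f ++ init := by
  induction l generalizing init with
  | nil => simp
  | cons x l ih =>
    simp [List.foldl_append, ih]

theorem format_world_name_witness_ok :
    Dom_format_world_name pvWitness_format_world_name.1 pvWitness_format_world_name.2.1
      pvWitness_format_world_name.2.2.1 pvWitness_format_world_name.2.2.2 ∧
    Pre_format_world_name pvWitness_format_world_name.1 pvWitness_format_world_name.2.1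
      pvWitness_format_world_name.2.2.1 pvWitness_format_world_name.2.2.2 := by
  decide

-- ===== VERDICT (by name: the statement is the Claim_ definition above) =====
theorem format_world_name_spec : Claim_equal_format_world_name := by
  intro world main_world linked_worlds world_names _ _
  unfold Spec_format_world_name format_world_name format_world_name_alt
  cases linked_worlds with
  | nil => simp
  | cons l rest =>
    simp only [List.foldl_cons, pv_foldA, pv_foldB, List.flatMap_cons, List.append_nil]
    simp
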